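-- pv_equiv track=rewrite | github.com/travvick1138/Classwork | nflteams.py | get_conference_and_division_from_team_name
-- ===== SOURCE A (Python) =====
-- def get_conference_and_division_from_team_name(teams, team_name):
--     """Return the conference and division from defined team name
--
--     >>>get_conference_and_division_from_team_name(Seattle Seahawks)
--     'Your Conference and Division is NFC West'
--
--     >>>get_conference_and_division_from_team_name(Houston Texans)
--     'Your Conference and Division is AFC South'
--     """
--     for conference in teams.keys():
--         for division in teams[conference].keys():
--             try:
--                 if teams[conference][division].index(team_name) > -1:
--                     return conference, division
--             except ValueError:
--                 continue
--
--     return None, None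
-- ===== SOURCE B (Python) =====
-- def get_conference_and_division_from_team_name(teams, team_name):
--     index = {}
--     for conference, divisions in teams.items():
--         for division, names in divisions.items():
--             for name in names:
--                 index.setdefault(name, (conference, division))
--     return index.get(team_name, (None, None))
-- ===== Notes on version B (the rewrite author's own statement) =====
-- stated objective: faster
-- what changed: Replaces the nested scan with early return (list.index inside try/except per division) by building a reverse-lookup dict in one pass with first-occurrence-wins setdefault, then answering with a single dict lookup.
import Mathlib
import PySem

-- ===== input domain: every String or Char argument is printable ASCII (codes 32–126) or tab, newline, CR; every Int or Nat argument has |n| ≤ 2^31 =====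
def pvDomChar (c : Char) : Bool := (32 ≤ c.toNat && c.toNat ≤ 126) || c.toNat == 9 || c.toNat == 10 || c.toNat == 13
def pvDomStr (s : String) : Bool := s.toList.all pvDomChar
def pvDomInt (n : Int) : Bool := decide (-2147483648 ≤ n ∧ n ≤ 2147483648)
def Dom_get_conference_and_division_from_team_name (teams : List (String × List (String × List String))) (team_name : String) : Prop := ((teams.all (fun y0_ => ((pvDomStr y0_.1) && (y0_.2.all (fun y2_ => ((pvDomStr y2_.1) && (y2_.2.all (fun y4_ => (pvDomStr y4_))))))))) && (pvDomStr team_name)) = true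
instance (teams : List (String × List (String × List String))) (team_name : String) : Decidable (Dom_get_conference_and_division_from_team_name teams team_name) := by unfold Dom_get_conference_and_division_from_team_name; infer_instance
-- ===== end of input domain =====

-- B builds a reverse-lookup dict in one pass (first-occurrence-wins setdefault) and answers with a
-- single lookup, instead of A's nested scan with early return via list.index/ValueError.

-- ===== PORT A =====
-- the inner 'for division in teams[conference].keys(): try: if ….index(…) > -1: return …'
def pvScanDivs (conference : String) (divs : List (String × List String)) (team_name : String) :
    Option (Option String × Option String) :=
  match divs with
  | [] => none
  | (division, names) :: rest =>
    match PySem.List.index? names team_name with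
    | some i => if (i : Int) > -1 then some (some conference, some division) else pvScanDivs conference rest team_name
    | none => pvScanDivs conference rest team_name   -- ValueError → continue

def get_conference_and_division_from_team_name (teams : List (String × List (String × List String))) (team_name : String) : Option String × Option String :=
  match teams with
  | [] => (none, none)
  | (conference, divs) :: rest =>
    match pvScanDivs conference divs team_name with
    | some r => r
    | none => get_conference_and_division_from_team_name rest team_name

-- ===== PORT B =====
-- index.setdefault(name, (conference, division)) over one name list
def pvAddNames (names : List String) (v : String × String) (d : PySem.Dict String (String × String)) :
    PySem.Dict String (String × String) :=
  names.foldl (fun d name => if d.contains name then d else d.insert name v) d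

def pvBuildIndex (teams : List (String × List (String × List String))) :
    PySem.Dict String (String × String) :=
  teams.foldl (fun d p => p.2.foldl (fun d q => pvAddNames q.2 (p.1, q.1) d) d) PySem.Dict.empty

def get_conference_and_division_from_team_name_alt (teams : List (String × List (String × List String))) (team_name : String) : Option String × Option String :=
  match (pvBuildIndex teams).get? team_name with
  | some (c, dv) => (some c, some dv)
  | none => (none, none)

-- ===== PRECONDITION & SPEC =====
def Spec_get_conference_and_division_from_team_name (teams : List (String × List (String × List String))) (team_name : String) (out : Option String × Option String) : Prop := out = get_conference_and_division_from_team_name_alt teams team_name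
instance (teams : List (String × List (String × List String))) (team_name : String) (out : Option String × Option String) : Decidable (Spec_get_conference_and_division_from_team_name teams team_name out) := by unfold Spec_get_conference_and_division_from_team_name; infer_instance

-- ===== CLAIM (what is proved, stated in full; the proofs are below) =====
def Claim_equal_get_conference_and_division_from_team_name : Prop := ∀ (teams : List (String × List (String × List String))) (team_name : String), Dom_get_conference_and_division_from_team_name teams team_name → Spec_get_conference_and_division_from_team_name teams team_name (get_conference_and_division_from_team_name teams team_name)

-- ===== LEMMAS AND PROOFS =====

-- the setdefault fold over one name list: an existing binding survives; otherwise the value is v iff the name occurs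
theorem pvAddNames_get? (names : List String) (v : String × String)
    (d : PySem.Dict String (String × String)) (tn : String) :
    (pvAddNames names v d).get? tn =
      ((d.get? tn).orElse (fun _ => if tn ∈ names then some v else none)) := by
  induction names generalizing d with
  | nil => simp [pvAddNames]
  | cons x xs ih =>
    simp only [pvAddNames, List.foldl_cons] at ih ⊢
    by_cases hx : d.contains x = true
    · rw [if_pos hx, ih]
      by_cases htn : tn = x
      · subst htn
        have hs : d.get? tn ≠ none := by
          intro h
          rw [PySem.Dict.get?_eq_none_iff_contains] at h
          simp [h] at hx
        obtain ⟨w, hw⟩ := Option.ne_none_iff_exists'.mp hs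
        simp [hw]
      · simp [List.mem_cons, htn]
    · rw [if_neg hx, ih]
      have hd : d.get? x = none :=
        (PySem.Dict.get?_eq_none_iff_contains d x).mpr (by simpa using hx)
      by_cases htn : tn = x
      · subst htn
        simp [PySem.Dict.get?_insert_self, hd, Option.orElse]
      · rw [PySem.Dict.get?_insert_of_ne d v htn]
        simp [List.mem_cons, htn]

-- A's inner scan only ever returns (some conference, some division)
theorem pvScanDivs_some (c : String) (divs : List (String × List String)) (tn : String)
    (r : Option String × Option String) (h : pvScanDivs c divs tn = some r) :
    ∃ dv, r = (some c, some dv) := by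
  induction divs with
  | nil => simp [pvScanDivs] at h
  | cons q qs ih =>
    obtain ⟨dv, names⟩ := q
    simp only [pvScanDivs] at h
    cases hidx : PySem.List.index? names tn with
    | none => simp only [hidx] at h; exact ih h
    | some i =>
      by_cases hgt : (i : Int) > -1
      · simp only [hidx, hgt, if_true] at h
        exact ⟨dv, (Option.some_inj.mp h).symm⟩
      · simp only [hidx, hgt, if_false] at h; exact ih h

-- B's setdefault fold over one conference computes A's inner scan (when the key is not yet bound)
theorem pvScanDivs_eq (c : String) (divs : List (String × List String)) (tn : String)
    (d : PySem.Dict String (String × String)) :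
    (divs.foldl (fun d q => pvAddNames q.2 (c, q.1) d) d).get? tn =
      (d.get? tn).orElse (fun _ =>
        match pvScanDivs c divs tn with
        | some (some _, some dv) => some (c, dv)
        | _ => none) := by
  induction divs generalizing d with
  | nil => simp [pvScanDivs]
  | cons q qs ih =>
    obtain ⟨dv, names⟩ := q
    simp only [List.foldl_cons]
    rw [ih, pvAddNames_get?]
    simp only [pvScanDivs]
    cases hidx : PySem.List.index? names tn with
    | none =>
      have hmem : tn ∉ names := (PySem.List.index?_eq_none_iff names tn).mp hidx
      simp only [hmem, if_false]
      cases d.get? tn <;> simp [Option.orElse]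
    | some i =>
      have hmem : tn ∈ names := by
        by_contra hc
        rw [(PySem.List.index?_eq_none_iff names tn).mpr hc] at hidx
        cases hidx
      have hgt : (i : Int) > -1 := by omega
      simp only [hgt, if_true, hmem]
      cases d.get? tn <;> simp [Option.orElse]

-- the full index's lookup computes A's nested scan
theorem pvBuildIndex_get? (teams : List (String × List (String × List String))) (tn : String)
    (d : PySem.Dict String (String × String)) :
    (teams.foldl (fun d p => p.2.foldl (fun d q => pvAddNames q.2 (p.1, q.1) d) d) d).get? tn =
      (d.get? tn).orElse (fun _ =>
        match get_conference_and_division_from_team_name teams tn with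
        | (some c, some dv) => some (c, dv)
        | _ => none) := by
  induction teams generalizing d with
  | nil =>
    simp only [List.foldl_nil, get_conference_and_division_from_team_name]
    cases d.get? tn <;> simp [Option.orElse]
  | cons p ps ih =>
    obtain ⟨c, divs⟩ := p
    simp only [List.foldl_cons]
    rw [ih, pvScanDivs_eq]
    simp only [get_conference_and_division_from_team_name]
    cases hscan : pvScanDivs c divs tn with
    | none => cases d.get? tn <;> simp [Option.orElse]
    | some r =>
      obtain ⟨dv, rfl⟩ := pvScanDivs_some c divs tn r hscan
      cases d.get? tn <;> simp [Option.orElse]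

-- A's result is either (none, none) or (some, some)
theorem pvA_shape (teams : List (String × List (String × List String))) (tn : String) :
    get_conference_and_division_from_team_name teams tn = (none, none) ∨
      ∃ c dv, get_conference_and_division_from_team_name teams tn = (some c, some dv) := by
  induction teams with
  | nil => left; rfl
  | cons p ps ih =>
    obtain ⟨c, divs⟩ := p
    simp only [get_conference_and_division_from_team_name]
    cases hscan : pvScanDivs c divs tn with
    | none => exact ih
    | some r =>
      obtain ⟨dv, rfl⟩ := pvScanDivs_some c divs tn r hscan
      right; exact ⟨c, dv, rfl⟩

-- ===== VERDICT (by name: the statement is the Claim_ definition above) =====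
theorem get_conference_and_division_from_team_name_spec : Claim_equal_get_conference_and_division_from_team_name := by
  intro teams tn _
  unfold Spec_get_conference_and_division_from_team_name
  unfold get_conference_and_division_from_team_name_alt pvBuildIndex
  rw [pvBuildIndex_get?]
  rcases pvA_shape teams tn with h | ⟨c, dv, h⟩ <;> rw [h] <;> simp [Option.orElse]
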